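-- pv_equiv track=rewrite | github.com/Jeff-Lowrey/leet_code | solutions/string-manipulation/python/0541-reverse-string-ii.py | reverseStrVerbose
-- ===== SOURCE A (Python) =====
-- def reverseStrVerbose(s: str, k: int) -> str:
--     """
--     More verbose implementation with explicit logic.
--
--     Args:
--         s: Input string
--         k: Reversal segment size
--
--     Returns:
--         String with alternating reversed segments
--     """
--     if not s or k <= 0:
--         return s
--
--     chars = list(s)
--     n = len(chars)
--
--     # Process every 2k characters
--     i = 0
--     while i < n:
--         # Calculate the end of the k-segment to reverse
--         end = min(i + k, n)
--
--         # Reverse the segment [i, end)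
--         left, right = i, end - 1
--         while left < right:
--             chars[left], chars[right] = chars[right], chars[left]
--             left += 1
--             right -= 1
--
--         # Move to the next 2k chunk
--         i += 2 * k
--
--     return "".join(chars)
-- ===== SOURCE B (Python) =====
-- def reverseStrVerbose(s: str, k: int) -> str:
--     """Chunked rebuild: walk the string in k-sized slices, reversing every other one."""
--     if not s or k <= 0:
--         return s
--     pieces = []
--     rev = True
--     for i in range(0, len(s), k):
--         seg = s[i:i + k]
--         pieces.append(seg[::-1] if rev else seg)
--         rev = not rev
--     return "".join(pieces)
-- ===== Notes on version B (the rewrite author's own statement) =====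
-- stated objective: simpler
-- what changed: Replaced the 2k-stepping while-loop with a nested in-place two-pointer swap reversal by a single pass over k-sized slices with an alternating reverse flag, collecting pieces and joining them.
import Mathlib
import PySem

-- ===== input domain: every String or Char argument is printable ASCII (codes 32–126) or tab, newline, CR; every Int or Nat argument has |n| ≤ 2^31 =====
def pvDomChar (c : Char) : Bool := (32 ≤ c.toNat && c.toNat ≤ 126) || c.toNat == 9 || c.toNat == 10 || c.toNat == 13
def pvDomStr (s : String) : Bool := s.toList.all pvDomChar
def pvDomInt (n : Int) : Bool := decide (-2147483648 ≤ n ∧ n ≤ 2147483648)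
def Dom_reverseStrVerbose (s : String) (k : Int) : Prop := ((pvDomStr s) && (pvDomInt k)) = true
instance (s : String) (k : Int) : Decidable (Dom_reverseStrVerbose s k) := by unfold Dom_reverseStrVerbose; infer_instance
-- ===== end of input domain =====

-- B replaces A's 2k-stepping while-loop with nested in-place two-pointer swaps by one pass
-- over k-sized slices with an alternating reverse flag (objective: simpler).


-- ===== PORT A =====
-- inner 'while left < right' two-pointer swap loop (indices are in range at every call A makes,
-- so the total forms pyGetD/pySetD compute exactly Python's chars[left], chars[right] accesses)
def pvSwapLoop (chars : List Char) (left right : Int) : List Char :=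
  if left < right then
    pvSwapLoop
      (PySem.List.pySetD
        (PySem.List.pySetD chars left (PySem.List.pyGetD chars right ' '))
        right (PySem.List.pyGetD chars left ' '))
      (left + 1) (right - 1)
  else chars
termination_by (right - left).toNat
decreasing_by omega

-- outer 'while i < n' loop stepping by 2k (A only runs it with 0 < k, which termination needs)
def pvOuter (chars : List Char) (n k : Int) (hk : 0 < k) (i : Int) : List Char :=
  if i < n then
    pvOuter (pvSwapLoop chars i (min (i + k) n - 1)) n k hk (i + 2 * k)
  else chars
termination_by (n - i).toNat
decreasing_by omega

def reverseStrVerbose (s : String) (k : Int) : String :=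
  if h : s.toList = [] ∨ k ≤ 0 then s
  else
    String.mk (pvOuter s.toList (PySem.List.len s.toList) k
      (by rcases not_or.mp h with ⟨_, h2⟩; omega) 0)

-- ===== PORT B =====
-- B's loop body: seg = s[i:i+k]; pieces.append(seg[::-1] if rev else seg); rev = not rev
-- (seg[::-1] is List.reverse, exactly PySem.List.slice?_none_none_neg_one)
def pvChunkStep (full : List Char) (k : Int) (st : List (List Char) × Bool) (i : Int) :
    List (List Char) × Bool :=
  let seg := PySem.List.slice full (some i) (some (i + k))
  (st.1 ++ [if st.2 then seg.reverse else seg], !st.2)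

def reverseStrVerbose_alt (s : String) (k : Int) : String :=
  if s.toList = [] ∨ k ≤ 0 then s
  else
    let r := (PySem.List.pyRange 0 (PySem.List.len s.toList) k).foldl
      (pvChunkStep s.toList k) ([], true)
    String.mk r.1.flatten

-- ===== PRECONDITION & SPEC =====
def Spec_reverseStrVerbose (s : String) (k : Int) (out : String) : Prop := out = reverseStrVerbose_alt s k
instance (s : String) (k : Int) (out : String) : Decidable (Spec_reverseStrVerbose s k out) := by unfold Spec_reverseStrVerbose; infer_instance

-- ===== CLAIM (what is proved, stated in full; the proofs are below) =====
def Claim_equal_reverseStrVerbose : Prop := ∀ (s : String) (k : Int), Dom_reverseStrVerbose s k → Spec_reverseStrVerbose s k (reverseStrVerbose s k)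

-- ===== LEMMAS AND PROOFS =====

-- reference function both ports are reduced to: alternately reverse k-chunks (used with 0 < k)
def pvR (k : Nat) (cs : List Char) (rev : Bool) : List Char :=
  match cs with
  | [] => []
  | c :: t =>
    if k = 0 then c :: t
    else (if rev then ((c :: t).take k).reverse else (c :: t).take k) ++
      pvR k ((c :: t).drop k) (!rev)
termination_by cs.length
decreasing_by simp; omega

lemma pvR_nil (k : Nat) (rev : Bool) : pvR k [] rev = [] := by rw [pvR.eq_def]

lemma pvR_cons (k : Nat) (hk : 0 < k) (cs : List Char) (h : cs ≠ []) (rev : Bool) :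
    pvR k cs rev = (if rev then (cs.take k).reverse else cs.take k) ++ pvR k (cs.drop k) (!rev) := by
  rcases cs with _ | ⟨c, t⟩
  · exact absurd rfl h
  · rw [pvR.eq_def]
    simp only [if_neg (by omega : ¬ k = 0)]

lemma pvR_two_step (k : Nat) (hk : 0 < k) (cs : List Char) (h : cs ≠ []) :
    pvR k cs true = (cs.take k).reverse ++ ((cs.drop k).take k ++ pvR k (cs.drop (k + k)) true) := by
  rw [pvR_cons k hk cs h true]
  simp only [Bool.not_true]
  by_cases h2 : cs.drop k = []
  · have h3 : cs.drop (k + k) = [] := by rw [← List.drop_drop, h2, List.drop_nil]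
    rw [h2, h3, pvR_nil, pvR_nil]
    simp
  · rw [pvR_cons k hk _ h2 false]
    simp [List.drop_drop]

lemma pyGetD_append_cons (pre ys : List Char) (y d : Char) :
    PySem.List.pyGetD (pre ++ y :: ys) ((pre.length : Int)) d = y := by
  rw [PySem.List.pyGetD_natCast]
  simp [List.getD_eq_getElem?_getD]

lemma pySetD_append_cons (pre ys : List Char) (y v : Char) :
    PySem.List.pySetD (pre ++ y :: ys) ((pre.length : Int)) v = pre ++ v :: ys := by
  rw [PySem.List.pySetD_natCast]
  induction pre with
  | nil => simp
  | cons p pr ih => simp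

-- the two-pointer loop reverses an interior segment written as a :: mid ++ [b]
lemma pvSwap_core : ∀ (m : Nat) (mid pre post : List Char) (a b : Char), mid.length = m →
    pvSwapLoop (pre ++ a :: (mid ++ b :: post)) (pre.length : Int)
        ((pre.length : Int) + (mid.length : Int) + 1)
      = pre ++ b :: (mid.reverse ++ a :: post) := by
  intro m
  induction m using Nat.strong_induction_on with
  | _ m IH =>
    intro mid pre post a b hm
    rw [pvSwapLoop, if_pos (by omega)]
    have e1 : PySem.List.pyGetD (pre ++ a :: (mid ++ b :: post)) ((pre.length : Int)) ' ' = a :=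
      pyGetD_append_cons pre (mid ++ b :: post) a ' '
    have e2 : PySem.List.pyGetD (pre ++ a :: (mid ++ b :: post))
        ((pre.length : Int) + (mid.length : Int) + 1) ' ' = b := by
      have h := pyGetD_append_cons (pre ++ a :: mid) post b ' '
      simp only [List.append_assoc, List.cons_append, List.length_append, List.length_cons] at h
      convert h using 2
    rw [e1, e2]
    have e3 : PySem.List.pySetD (pre ++ a :: (mid ++ b :: post)) ((pre.length : Int)) b
        = pre ++ b :: (mid ++ b :: post) := pySetD_append_cons pre (mid ++ b :: post) a b
    rw [e3]
    have e4 : PySem.List.pySetD (pre ++ b :: (mid ++ b :: post))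
        ((pre.length : Int) + (mid.length : Int) + 1) a = pre ++ b :: (mid ++ a :: post) := by
      have h := pySetD_append_cons (pre ++ b :: mid) post b a
      simp only [List.append_assoc, List.cons_append, List.length_append, List.length_cons] at h
      convert h using 2
    rw [e4]
    rcases mid with _ | ⟨c, mid'⟩
    · rw [pvSwapLoop, if_neg (by simp only [List.length_nil]; omega)]
      simp
    · rcases List.eq_nil_or_concat mid' with h' | ⟨core, d, h'⟩
      · subst h'
        rw [pvSwapLoop, if_neg (by simp only [List.length_cons, List.length_nil]; omega)]
        simp
      · subst h'
        simp only [List.concat_eq_append] at hm ⊢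
        have h5 := IH core.length (by simp only [List.length_cons, List.length_append, List.length_nil] at hm; omega) core (pre ++ [b]) (a :: post) c d rfl
        push_cast [List.append_assoc, List.cons_append, List.nil_append, List.length_append,
          List.length_cons, List.length_nil] at h5
        have hidx : ((pre.length : Int) + (((c :: (core ++ [d])).length : Nat) : Int) + 1 - 1)
            = (pre.length : Int) + 1 + (core.length : Int) + 1 := by
          push_cast [List.length_cons, List.length_append, List.length_nil]
          omega
        rw [hidx]
        simpa [List.append_assoc] using h5

lemma pvSwapLoop_decomp (seg pre post : List Char) :
    pvSwapLoop (pre ++ (seg ++ post)) (pre.length : Int)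
        ((pre.length : Int) + (seg.length : Int) - 1)
      = pre ++ (seg.reverse ++ post) := by
  rcases seg with _ | ⟨a, t⟩
  · rw [pvSwapLoop, if_neg (by simp only [List.length_nil]; omega)]
    simp
  · rcases List.eq_nil_or_concat t with h' | ⟨mid, b, h'⟩
    · subst h'
      rw [pvSwapLoop, if_neg (by simp only [List.length_cons, List.length_nil]; omega)]
      simp
    · subst h'
      simp only [List.concat_eq_append]
      have h5 := pvSwap_core mid.length mid pre post a b rfl
      have hidx : ((pre.length : Int) + (((a :: (mid ++ [b])).length : Nat) : Int) - 1)
          = (pre.length : Int) + (mid.length : Int) + 1 := by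
        push_cast [List.length_cons, List.length_append, List.length_nil]
        omega
      rw [hidx]
      simpa [List.append_assoc] using h5

-- A's outer loop, from index i on, computes pvR of the tail
lemma pvOuter_eq (k : Int) (hk : 0 < k) : ∀ (m : Nat) (chars : List Char) (i : Int), 0 ≤ i →
    (((chars.length : Int)) - i).toNat = m →
    pvOuter chars (chars.length : Int) k hk i
      = chars.take i.toNat ++ pvR k.toNat (chars.drop i.toNat) true := by
  intro m
  induction m using Nat.strong_induction_on with
  | _ m IH =>
    intro chars i hi hm
    rw [pvOuter]
    by_cases hin : i < (chars.length : Int)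
    · rw [if_pos hin]
      have hK : 0 < k.toNat := by omega
      have hjlt : i.toNat < chars.length := by omega
      set j := i.toNat with hj
      set K := k.toNat with hKdef
      set cs := chars.drop j with hcs
      have hcslen : cs.length = chars.length - j := by rw [hcs]; simp
      set k2 := min K cs.length with hk2
      have hk2pos : 0 < k2 := by omega
      have hsegl : (cs.take k2).length = k2 := by simp; omega
      have hprel : (chars.take j).length = j := by simp; omega
      have hchars : chars.take j ++ (cs.take k2 ++ cs.drop k2) = chars := by
        rw [List.take_append_drop, hcs, List.take_append_drop]
      have hswap : pvSwapLoop chars i (min (i + k) (chars.length : Int) - 1)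
          = chars.take j ++ ((cs.take k2).reverse ++ cs.drop k2) := by
        have h5 := pvSwapLoop_decomp (cs.take k2) (chars.take j) (cs.drop k2)
        rw [hprel, hsegl, hchars] at h5
        rw [show i = ((j : Nat) : Int) by omega,
          show min (((j : Nat) : Int) + k) (chars.length : Int) - 1
              = ((j : Nat) : Int) + ((k2 : Nat) : Int) - 1 by omega]
        exact h5
      rw [hswap]
      set chars1 := chars.take j ++ ((cs.take k2).reverse ++ cs.drop k2) with hc1
      have hlen1 : chars1.length = chars.length := by
        simp [hc1]
        omega
      rw [← hlen1]
      rw [IH (((chars1.length : Int)) - (i + 2 * k)).toNat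
        (by rw [hlen1]; omega) chars1 (i + 2 * k) (by omega) rfl]
      have h2i : (i + 2 * k).toNat = j + (K + K) := by omega
      rw [h2i]
      have htake : chars1.take (j + (K + K))
          = chars.take j ++ ((cs.take K).reverse ++ (cs.drop K).take K) := by
        rw [hc1, List.take_append, List.take_append]
        have ht1 : (chars.take j).take (j + (K + K)) = chars.take j :=
          List.take_of_length_le (by rw [hprel]; omega)
        have ht2 : ((cs.take k2).reverse).take (j + (K + K) - (chars.take j).length)
            = (cs.take k2).reverse :=
          List.take_of_length_le (by rw [List.length_reverse, hsegl, hprel]; omega)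
        rw [ht1, ht2, hprel, List.length_reverse, hsegl]
        congr 1
        congr 1
        · congr 1
          rcases Nat.lt_or_ge cs.length K with hlt | hle
          · rw [show k2 = cs.length by omega, List.take_length,
              List.take_of_length_le (by omega)]
          · rw [show k2 = K by omega]
        · rcases Nat.lt_or_ge cs.length K with hlt | hle
          · rw [show k2 = cs.length by omega, List.drop_length,
              List.drop_eq_nil_of_le (by omega)]
            simp
          · rw [show k2 = K by omega, show j + (K + K) - j - K = K by omega]
      have hdrop : chars1.drop (j + (K + K)) = cs.drop (K + K) := by
        rw [hc1, List.drop_append, List.drop_append]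
        have hd1 : (chars.take j).drop (j + (K + K)) = [] :=
          List.drop_eq_nil_of_le (by rw [hprel]; omega)
        have hd2 : ((cs.take k2).reverse).drop (j + (K + K) - (chars.take j).length) = [] :=
          List.drop_eq_nil_of_le (by rw [List.length_reverse, hsegl, hprel]; omega)
        rw [hd1, hd2, List.nil_append, List.nil_append, List.length_reverse, hsegl, hprel,
          List.drop_drop]
        congr 1
        omega
      rw [htake, hdrop]
      rw [pvR_two_step K hK cs (by intro hnil; rw [hnil] at hcslen; simp at hcslen; omega)]
      simp [List.append_assoc]
    · rw [if_neg hin]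
      have h1 : chars.drop i.toNat = [] := List.drop_eq_nil_of_le (by omega)
      rw [h1, pvR_nil, List.append_nil, List.take_of_length_le (by omega)]


-- general-step range induction (no named PySem lemma gives a cons-unfolding for step > 1)
lemma pyRange_pos_nil (a b s : Int) (hs : 0 < s) (h : b ≤ a) : PySem.List.pyRange a b s = [] := by
  rw [PySem.List.pyRange_of_pos a b hs, if_neg (by omega)]
  simp

lemma pyRange_pos_cons (a b s : Int) (hs : 0 < s) (h : a < b) :
    PySem.List.pyRange a b s = a :: PySem.List.pyRange (a + s) b s := by
  rw [PySem.List.pyRange_of_pos a b hs, PySem.List.pyRange_of_pos (a + s) b hs, if_pos h]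
  have hnn : 0 ≤ (b - a - 1) / s := Int.ediv_nonneg (by omega) (by omega)
  have hsplit : (b - a + s - 1) / s = (b - a - 1) / s + 1 := by
    rw [show b - a + s - 1 = b - a - 1 + 1 * s by ring,
      Int.add_mul_ediv_right _ _ (by omega : s ≠ 0)]
  by_cases h2 : a + s < b
  · rw [if_pos h2]
    have he : ((b - a + s - 1) / s).toNat = ((b - (a + s) + s - 1) / s).toNat + 1 := by
      rw [hsplit, show b - (a + s) + s - 1 = b - a - 1 by ring]
      omega
    rw [he, List.range_succ_eq_map]
    simp only [List.map_cons, List.map_map, Nat.cast_zero, mul_zero, add_zero, List.cons.injEq,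
      true_and]
    apply List.map_congr_left
    intro x hx
    simp only [Function.comp_apply]
    push_cast
    ring
  · rw [if_neg h2]
    have hz : (b - a - 1) / s = 0 := Int.ediv_eq_zero_of_lt (by omega) (by omega)
    rw [show ((b - a + s - 1) / s).toNat = 1 by rw [hsplit, hz]; norm_num]
    simp

-- B's fold over range(i, n, k) appends pvR of the tail
lemma pvFoldB_eq (k : Int) (hk : 0 < k) (full : List Char) : ∀ (m : Nat) (i : Int), 0 ≤ i →
    (((full.length : Int)) - i).toNat = m → ∀ (acc : List (List Char)) (rev : Bool),
    (((PySem.List.pyRange i (full.length : Int) k).foldl (pvChunkStep full k) (acc, rev)).1).flatten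
      = acc.flatten ++ pvR k.toNat (full.drop i.toNat) rev := by
  intro m
  induction m using Nat.strong_induction_on with
  | _ m IH =>
    intro i hi hm acc rev
    by_cases hin : i < (full.length : Int)
    · rw [pyRange_pos_cons i _ k hk hin, List.foldl_cons]
      have hseg : PySem.List.slice full (some i) (some (i + k))
          = (full.drop i.toNat).take k.toNat := by
        rw [PySem.List.slice_toNat]
        · congr 1
          omega
        · exact hi
        · omega
      have hstep : pvChunkStep full k (acc, rev) i
          = (acc ++ [if rev then ((full.drop i.toNat).take k.toNat).reverse
                     else (full.drop i.toNat).take k.toNat], !rev) := by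
        simp [pvChunkStep, hseg]
      rw [hstep]
      rw [IH (((full.length : Int)) - (i + k)).toNat (by omega) (i + k) (by omega) rfl]
      have hne : full.drop i.toNat ≠ [] := by
        intro h0
        have := congrArg List.length h0
        simp at this
        omega
      rw [pvR_cons k.toNat (by omega) _ hne rev]
      have hdd : full.drop (i + k).toNat = (full.drop i.toNat).drop k.toNat := by
        rw [List.drop_drop]
        congr 1
        omega
      rw [hdd]
      simp [List.append_assoc]
    · rw [pyRange_pos_nil i _ k hk (by omega), List.foldl_nil]
      have h1 : full.drop i.toNat = [] := List.drop_eq_nil_of_le (by omega)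
      rw [h1, pvR_nil]
      simp

-- ===== VERDICT (by name: the statement is the Claim_ definition above) =====
theorem reverseStrVerbose_spec : Claim_equal_reverseStrVerbose := by
  intro s k _
  unfold Spec_reverseStrVerbose reverseStrVerbose reverseStrVerbose_alt
  by_cases h : s.toList = [] ∨ k ≤ 0
  · rw [dif_pos h, if_pos h]
  · rw [dif_neg h, if_neg h]
    rcases not_or.mp h with ⟨h1, h2⟩
    have hk : 0 < k := by omega
    simp only [PySem.List.len_eq]
    rw [pvOuter_eq k _ s.toList.length s.toList 0 (le_refl 0) (by omega),
        pvFoldB_eq k hk s.toList s.toList.length 0 (le_refl 0) (by omega) [] true]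
    simp
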